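-- pv_equiv track=rewrite | github.com/queelius/ctk | ctk/core/slug.py | slug_matches
-- ===== SOURCE A (Python) =====
-- def slug_matches(slug: str, query: str) -> bool:
--     """
--     Check if a query matches a slug (supports partial matching).
--
--     Args:
--         slug: The full slug to match against
--         query: The query string (may be partial)
--
--     Returns:
--         True if query matches slug
--
--     Examples:
--         >>> slug_matches("discussion-python-hints", "discussion")
--         True
--         >>> slug_matches("discussion-python-hints", "python")
--         True
--         >>> slug_matches("discussion-python-hints", "disc-py")
--         False
--     """
--     if not slug or not query:
--         return False
--
--     # Exact match
--     if slug == query: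
--         return True
--
--     # Prefix match
--     if slug.startswith(query):
--         return True
--
--     # Word-based partial match (all query words must appear in order)
--     query_words = query.split("-")
--     slug_words = slug.split("-")
--
--     query_idx = 0
--     for slug_word in slug_words:
--         if query_idx < len(query_words) and slug_word.startswith(
--             query_words[query_idx]
--         ):
--             query_idx += 1
--         if query_idx == len(query_words):
--             return True
--
--     return False
-- ===== SOURCE B (Python) =====
-- def slug_matches(slug: str, query: str) -> bool:
--     """Check if a query matches a slug (supports partial matching)."""
--     if not slug or not query:
--         return False
--     if slug == query or slug.startswith(query):
--         return True
--     # Word-based partial match, done back-to-front: pair each query word with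
--     # the LAST slug word that can take it.  An in-order matching exists iff a
--     # latest-match one does, so this agrees with any forward matching.
--     pending = query.split("-")[::-1]
--     for sw in reversed(slug.split("-")):
--         if pending and sw.startswith(pending[0]):
--             pending = pending[1:]
--     return not pending
-- ===== Notes on version B (the rewrite author's own statement) =====
-- stated objective: alternative
-- what changed: Replaces A's forward greedy scan (query_idx counter, earliest slug word per query word, early return) by a back-to-front scan that matches each query word to its latest possible slug word and succeeds when the pending query-word list empties.
import Mathlib
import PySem

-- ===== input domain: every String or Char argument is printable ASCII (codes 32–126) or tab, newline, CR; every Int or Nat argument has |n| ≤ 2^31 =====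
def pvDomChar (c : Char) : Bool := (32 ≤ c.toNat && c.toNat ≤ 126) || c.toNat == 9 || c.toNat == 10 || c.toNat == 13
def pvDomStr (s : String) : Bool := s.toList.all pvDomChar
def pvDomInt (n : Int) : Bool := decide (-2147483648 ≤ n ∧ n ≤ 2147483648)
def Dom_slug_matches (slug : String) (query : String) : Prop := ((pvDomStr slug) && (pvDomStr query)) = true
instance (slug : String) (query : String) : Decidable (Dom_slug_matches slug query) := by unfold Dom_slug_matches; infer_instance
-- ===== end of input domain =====

-- B replaces A's forward greedy scan by a back-to-front scan matching each query
-- word to its latest possible slug word (objective: alternative, same cost).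

-- ===== PORT A =====
-- the 'for slug_word in slug_words' loop with its query_idx counter and early return
def slugLoopA (qws : List (List Char)) (sws : List (List Char)) (qi : Nat) : Bool :=
  match sws with
  | [] => false
  | w :: rest =>
    let qi' := if qi < qws.length && PySem.Chars.startswith w (qws.getD qi []) then qi + 1 else qi
    if qi' = qws.length then true else slugLoopA qws rest qi'

def slug_matches (slug : String) (query : String) : Bool :=
  if slug == "" || query == "" then false
  else if slug == query then true
  else if PySem.Chars.startswith slug.toList query.toList then true
  else
    -- s.split("-"): sep is nonempty, so PySem.Chars.splitOn is exact here
    slugLoopA (PySem.Chars.splitOn query.toList "-".toList)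
              (PySem.Chars.splitOn slug.toList "-".toList) 0

-- ===== PORT B =====
-- the 'for sw in reversed(slug.split("-"))' loop over the pending query words
-- (query.split("-")[::-1]); pending[0] / pending[1:] = head / tail
def slugLoopB (swsRev : List (List Char)) (pending : List (List Char)) : List (List Char) :=
  match swsRev with
  | [] => pending
  | sw :: rest =>
    let pending' :=
      match pending with
      | [] => pending
      | qw :: qrest => if PySem.Chars.startswith sw qw then qrest else pending
    slugLoopB rest pending'

def slug_matches_alt (slug : String) (query : String) : Bool :=
  if slug == "" || query == "" then false
  else if slug == query || PySem.Chars.startswith slug.toList query.toList then true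
  else
    (slugLoopB (PySem.Chars.splitOn slug.toList "-".toList).reverse
               (PySem.Chars.splitOn query.toList "-".toList).reverse).isEmpty

-- ===== PRECONDITION & SPEC =====
def Spec_slug_matches (slug : String) (query : String) (out : Bool) : Prop := out = slug_matches_alt slug query
instance (slug : String) (query : String) (out : Bool) : Decidable (Spec_slug_matches slug query out) := by unfold Spec_slug_matches; infer_instance

-- ===== CLAIM (what is proved, stated in full; the proofs are below) =====
def Claim_equal_slug_matches : Prop := ∀ (slug : String) (query : String), Dom_slug_matches slug query → Spec_slug_matches slug query (slug_matches slug query)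

-- ===== LEMMAS AND PROOFS =====
-- proof-only helper: the in-order prefix-subsequence test, stepping through slug words
def slugSubseq (qws : List (List Char)) (sws : List (List Char)) : Bool :=
  match qws, sws with
  | [], _ => true
  | _ :: _, [] => false
  | qw :: qrest, sw :: srest =>
    if PySem.Chars.startswith sw qw then slugSubseq qrest srest
    else slugSubseq (qw :: qrest) srest

-- proof-only helper: an in-order matching of query words to distinct slug words
inductive SlugMatch : List (List Char) → List (List Char) → Prop
  | nil (sws : List (List Char)) : SlugMatch [] sws
  | cons {qw sw : List Char} {qr sr : List (List Char)} :
      PySem.Chars.startswith sw qw = true → SlugMatch qr sr → SlugMatch (qw :: qr) (sw :: sr)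
  | skip {sw : List Char} {q sr : List (List Char)} :
      SlugMatch q sr → SlugMatch q (sw :: sr)

lemma subseq_drop_head (s : List (List Char)) (qw : List Char) (q : List (List Char))
    (h : slugSubseq (qw :: q) s = true) : slugSubseq q s = true := by
  induction s generalizing qw q with
  | nil => simp [slugSubseq] at h
  | cons sw sr ih =>
    rw [slugSubseq] at h
    cases q with
    | nil => simp [slugSubseq]
    | cons qw2 qr =>
      rw [slugSubseq]
      split_ifs at h with h1
      · split_ifs with h2
        · exact ih qw2 qr h
        · exact h
      · have h' := ih qw (qw2 :: qr) h
        split_ifs with h2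
        · exact ih qw2 qr h'
        · exact h'

lemma subseq_of_match {q s : List (List Char)} (h : SlugMatch q s) : slugSubseq q s = true := by
  induction h with
  | nil => simp [slugSubseq]
  | cons hs _ ih => simp [slugSubseq, hs, ih]
  | @skip sw q sr _ ih =>
    cases q with
    | nil => simp [slugSubseq]
    | cons qw qr =>
      rw [slugSubseq]
      split_ifs with h2
      · exact subseq_drop_head sr qw qr ih
      · exact ih

lemma match_of_subseq (s q : List (List Char)) (h : slugSubseq q s = true) : SlugMatch q s := by
  induction s generalizing q with
  | nil =>
    cases q with
    | nil => exact SlugMatch.nil []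
    | cons qw qr => simp [slugSubseq] at h
  | cons sw sr ih =>
    cases q with
    | nil => exact SlugMatch.nil _
    | cons qw qr =>
      rw [slugSubseq] at h
      split_ifs at h with h1
      · exact SlugMatch.cons h1 (ih qr h)
      · exact SlugMatch.skip (ih _ h)

lemma match_snoc {q s : List (List Char)} {qw sw : List Char}
    (h : SlugMatch q s) (hs : PySem.Chars.startswith sw qw = true) :
    SlugMatch (q ++ [qw]) (s ++ [sw]) := by
  induction h with
  | nil sws =>
    induction sws with
    | nil => exact SlugMatch.cons hs (SlugMatch.nil [])
    | cons w ws ihw => exact SlugMatch.skip ihw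
  | cons h1 _ ih => exact SlugMatch.cons h1 ih
  | skip _ ih => exact SlugMatch.skip ih

lemma match_snoc_skip {q s : List (List Char)} {sw : List Char}
    (h : SlugMatch q s) : SlugMatch q (s ++ [sw]) := by
  induction h with
  | nil sws => exact SlugMatch.nil _
  | cons h1 _ ih => exact SlugMatch.cons h1 ih
  | skip _ ih => exact SlugMatch.skip ih

lemma match_reverse {q s : List (List Char)} (h : SlugMatch q s) :
    SlugMatch q.reverse s.reverse := by
  induction h with
  | nil sws => exact SlugMatch.nil _
  | cons h1 _ ih => simpa using match_snoc ih h1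
  | skip _ ih => simpa using match_snoc_skip (sw := _) ih

lemma subseq_reverse (q s : List (List Char)) :
    slugSubseq q.reverse s.reverse = slugSubseq q s := by
  by_cases h : slugSubseq q s = true
  · rw [h, subseq_of_match (match_reverse (match_of_subseq s q h))]
  · rw [Bool.eq_false_iff.mpr h, Bool.eq_false_iff]
    intro h'
    exact h (subseq_of_match (by simpa using match_reverse (match_of_subseq _ _ h')))

lemma loopB_isEmpty (rs rq : List (List Char)) :
    (slugLoopB rs rq).isEmpty = slugSubseq rq rs := by
  induction rs generalizing rq with
  | nil => cases rq <;> simp [slugLoopB, slugSubseq]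
  | cons sw sr ih =>
    cases rq with
    | nil =>
      rw [slugLoopB]
      simp only [slugSubseq]
      rw [ih []]
      cases sr <;> simp [slugSubseq]
    | cons qw qr =>
      simp only [slugLoopB, slugSubseq]
      split_ifs with h1
      · exact ih qr
      · exact ih (qw :: qr)

lemma splitOn_go_ne_nil (sep : List Char) (fuel : Nat) (l cur : List Char)
    (acc : List (List Char)) : PySem.Chars.splitOn.go sep fuel l cur acc ≠ [] := by
  induction fuel generalizing l cur acc with
  | zero => simp [PySem.Chars.splitOn.go]
  | succ n ih =>
    cases l with
    | nil => simp [PySem.Chars.splitOn.go]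
    | cons c rest =>
      rw [PySem.Chars.splitOn.go]
      split
      · exact ih _ _ _
      · exact ih _ _ _

lemma splitOn_ne_nil (s sep : List Char) : PySem.Chars.splitOn s sep ≠ [] :=
  splitOn_go_ne_nil _ _ _ _ _

lemma loopA_eq_subseq (qws : List (List Char)) (sws : List (List Char)) (qi : Nat)
    (h : qi < qws.length) : slugLoopA qws sws qi = slugSubseq (qws.drop qi) sws := by
  induction sws generalizing qi with
  | nil =>
    rw [List.drop_eq_getElem_cons h]
    simp [slugLoopA, slugSubseq]
  | cons w rest ih =>
    have hget : qws[qi]?.getD ([] : List Char) = qws[qi] := by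
      rw [List.getElem?_eq_getElem h]; rfl
    by_cases hs : PySem.Chars.startswith w qws[qi] = true
    · by_cases hlast : qi + 1 = qws.length
      · simp [slugLoopA, slugSubseq, h, hs, hlast, List.drop_eq_getElem_cons h,
          List.drop_length]
      · have h1 : qi + 1 < qws.length := lt_of_le_of_ne h hlast
        have hL : slugLoopA qws (w :: rest) qi = slugLoopA qws rest (qi + 1) := by
          simp [slugLoopA, h, hs, hlast]
        have hR : slugSubseq (qws.drop qi) (w :: rest) = slugSubseq (qws.drop (qi + 1)) rest := by
          rw [List.drop_eq_getElem_cons h]; simp [slugSubseq, hs]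
        rw [hL, hR, ih (qi + 1) h1]
    · have hne : qi ≠ qws.length := Nat.ne_of_lt h
      have hL : slugLoopA qws (w :: rest) qi = slugLoopA qws rest qi := by
        simp [slugLoopA, hget, hs, hne]
      have hR : slugSubseq (qws.drop qi) (w :: rest) = slugSubseq (qws.drop qi) rest := by
        rw [List.drop_eq_getElem_cons h]; simp [slugSubseq, hs]
      rw [hL, hR, ih qi h]

-- ===== VERDICT (by name: the statement is the Claim_ definition above) =====
theorem slug_matches_spec : Claim_equal_slug_matches := by
  intro slug query _
  unfold Spec_slug_matches slug_matches slug_matches_alt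
  by_cases h0 : (slug == "" || query == "") = true
  · simp [h0]
  · by_cases h1 : (slug == query) = true
    · simp [h0, h1]
    · by_cases h2 : PySem.Chars.startswith slug.toList query.toList = true
      · simp [h0, h1, h2]
      · have hlen : 0 < (PySem.Chars.splitOn query.toList "-".toList).length :=
          List.length_pos_iff.mpr (splitOn_ne_nil _ _)
        simp only [h0, h1, h2, Bool.false_eq_true, if_false]
        rw [loopA_eq_subseq _ _ 0 hlen, loopB_isEmpty, subseq_reverse]
        simp
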